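-- pv_equiv track=rewrite | github.com/Belaid1033/ezrax-project | ezrax-agent/scanners/port_scan_scanner.py | _analyze_port_ranges
-- ===== SOURCE A (Python) =====
-- from typing import Dict, List, Any, Optional, Tuple, Set
--
-- def _analyze_port_ranges(ports: Set[int]) -> Dict[str, int]:
--     """Analyse la distribution des ports scannés"""
--     ranges = {
--         "well_known": 0,      # 1-1023
--         "registered": 0,       # 1024-49151
--         "dynamic": 0,         # 49152-65535
--         "sequential": 0       # Ports consécutifs
--     }
--
--     sorted_ports = sorted(ports)
--
--     for port in sorted_ports:
--         if port <= 1023: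
--             ranges["well_known"] += 1
--         elif port <= 49151:
--             ranges["registered"] += 1
--         else:
--             ranges["dynamic"] += 1
--
--     # Détecter les séquences de ports consécutifs
--     consecutive_count = 0
--     for i in range(len(sorted_ports) - 1):
--         if sorted_ports[i + 1] - sorted_ports[i] == 1:
--             consecutive_count += 1
--
--     ranges["sequential"] = consecutive_count
--
--     return ranges
-- ===== SOURCE B (Python) =====
-- from bisect import bisect_right
--
--
-- def _analyze_port_ranges(ports):
--     """Analyse la distribution des ports scannés"""
--     s = sorted(ports)
--     w = bisect_right(s, 1023)
--     r = bisect_right(s, 49151)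
--     return {
--         "well_known": w,
--         "registered": r - w,
--         "dynamic": len(s) - r,
--         "sequential": sum(1 for a, b in zip(s, s[1:]) if b - a == 1),
--     }
-- ===== Notes on version B (the rewrite author's own statement) =====
-- stated objective: alternative
-- what changed: Replaces the per-element classification loop with two bisect_right binary searches on the sorted list to derive all three bucket sizes, and collapses the indexed consecutive-pair loop into a zip-based generator sum, building the result dict in one literal.
import Mathlib
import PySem

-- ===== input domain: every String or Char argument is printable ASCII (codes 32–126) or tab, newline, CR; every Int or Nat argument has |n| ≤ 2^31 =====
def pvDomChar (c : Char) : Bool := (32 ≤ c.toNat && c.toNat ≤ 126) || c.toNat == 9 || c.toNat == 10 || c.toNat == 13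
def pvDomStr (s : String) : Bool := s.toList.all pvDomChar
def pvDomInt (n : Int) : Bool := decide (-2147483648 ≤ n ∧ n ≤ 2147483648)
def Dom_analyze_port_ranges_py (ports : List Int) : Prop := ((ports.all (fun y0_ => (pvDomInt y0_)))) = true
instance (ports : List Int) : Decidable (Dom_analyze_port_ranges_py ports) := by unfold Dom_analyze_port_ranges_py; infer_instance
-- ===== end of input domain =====

-- B replaces the per-element classification loop by two bisect_right searches on the
-- sorted list and a zip-based pair count (alternative decomposition, same asymptotics).


-- ===== PORT A =====
def analyze_port_ranges_py (ports : List Int) : List (String × Int) :=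
  let ranges : PySem.Dict String Int :=
    PySem.Dict.ofList [("well_known", 0), ("registered", 0), ("dynamic", 0), ("sequential", 0)]
  let sorted_ports := PySem.List.sorted ports (fun x => x) false
  let ranges := sorted_ports.foldl (fun d port =>
    if port ≤ 1023 then d.modify "well_known" 0 (· + 1)
    else if port ≤ 49151 then d.modify "registered" 0 (· + 1)
    else d.modify "dynamic" 0 (· + 1)) ranges
  let consecutive_count : Int :=
    (PySem.List.pyRange 0 (PySem.List.len sorted_ports - 1)).foldl
      (fun c i => if PySem.List.pyGetD sorted_ports (i + 1) 0 - PySem.List.pyGetD sorted_ports i 0 = 1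
                  then c + 1 else c) 0
  (ranges.insert "sequential" consecutive_count).items

-- ===== PORT B =====
def analyze_port_ranges_py_alt (ports : List Int) : List (String × Int) :=
  let s := PySem.List.sorted ports (fun x => x) false
  let w : Int := PySem.List.bisectRight s 1023
  let r : Int := PySem.List.bisectRight s 49151
  [("well_known", w), ("registered", r - w),
   ("dynamic", PySem.List.len s - r),
   ("sequential", ((s.zip s.tail).countP (fun p => p.2 - p.1 == 1) : Int))]

-- ===== PRECONDITION & SPEC =====
def Spec_analyze_port_ranges_py (ports : List Int) (out : List (String × Int)) : Prop := out = analyze_port_ranges_py_alt ports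
instance (ports : List Int) (out : List (String × Int)) : Decidable (Spec_analyze_port_ranges_py ports out) := by unfold Spec_analyze_port_ranges_py; infer_instance

-- ===== CLAIM (what is proved, stated in full; the proofs are below) =====
def Claim_equal_analyze_port_ranges_py : Prop := ∀ (ports : List Int), Dom_analyze_port_ranges_py ports → Spec_analyze_port_ranges_py ports (analyze_port_ranges_py ports)

-- ===== LEMMAS AND PROOFS =====

-- A's classification loop over any list, counters generalized.
lemma pv_foldA (s : List Int) (a b c d0 : Int) :
    s.foldl (fun d port =>
      if port ≤ 1023 then d.modify "well_known" 0 (· + 1)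
      else if port ≤ 49151 then d.modify "registered" 0 (· + 1)
      else d.modify "dynamic" 0 (· + 1))
      (PySem.Dict.mk [("well_known", a), ("registered", b), ("dynamic", c), ("sequential", d0)]) =
    PySem.Dict.mk [("well_known", a + s.countP (fun x => decide (x ≤ 1023))),
                   ("registered", b + s.countP (fun x => !decide (x ≤ 1023) && decide (x ≤ 49151))),
                   ("dynamic", c + s.countP (fun x => !decide (x ≤ 1023) && !decide (x ≤ 49151))),
                   ("sequential", d0)] := by
  induction s generalizing a b c with
  | nil => simp
  | cons x t ih =>
    simp only [List.foldl_cons, List.countP_cons]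
    by_cases h1 : x ≤ 1023
    · have hd : (PySem.Dict.mk [("well_known", a), ("registered", b), ("dynamic", c), ("sequential", d0)]).modify "well_known" 0 (· + 1)
          = PySem.Dict.mk [("well_known", a + 1), ("registered", b), ("dynamic", c), ("sequential", d0)] := by
        simp [PySem.Dict.modify, PySem.Dict.insert, PySem.Dict.getD, PySem.Dict.get?]
      simp only [if_pos h1, hd, ih]
      simp [h1]; ring
    · by_cases h2 : x ≤ 49151
      · have hd : (PySem.Dict.mk [("well_known", a), ("registered", b), ("dynamic", c), ("sequential", d0)]).modify "registered" 0 (· + 1)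
            = PySem.Dict.mk [("well_known", a), ("registered", b + 1), ("dynamic", c), ("sequential", d0)] := by
          simp [PySem.Dict.modify, PySem.Dict.insert, PySem.Dict.getD, PySem.Dict.get?]
        simp only [if_neg h1, if_pos h2, hd, ih]
        simp [h1, h2]; ring
      · have hd : (PySem.Dict.mk [("well_known", a), ("registered", b), ("dynamic", c), ("sequential", d0)]).modify "dynamic" 0 (· + 1)
            = PySem.Dict.mk [("well_known", a), ("registered", b), ("dynamic", c + 1), ("sequential", d0)] := by
          simp [PySem.Dict.modify, PySem.Dict.insert, PySem.Dict.getD, PySem.Dict.get?]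
        simp only [if_neg h1, if_neg h2, hd, ih]
        simp [h1, h2]; ring

-- bisect_right on a sorted list = number of elements ≤ x.
lemma pv_bisect_countP (s : List Int) (x : Int) (hs : s.Pairwise (· ≤ ·)) :
    PySem.List.bisectRight s x = s.countP (fun a => decide (a ≤ x)) := by
  obtain ⟨hk, hlt, hge⟩ := PySem.List.bisectRight_spec s x hs
  set k := PySem.List.bisectRight s x with hkdef
  have hsplit : s = s.take k ++ s.drop k := (List.take_append_drop k s).symm
  rw [hsplit, List.countP_append]
  have h1 : (s.take k).countP (fun a => decide (a ≤ x)) = k := by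
    have hall : ∀ a ∈ s.take k, (fun a => decide (a ≤ x)) a = true := by
      intro a ha
      obtain ⟨i, hi, hget⟩ := List.getElem_of_mem ha
      rw [List.length_take] at hi
      have hik : i < k := lt_of_lt_of_le hi (min_le_left _ _)
      have hil : i < s.length := lt_of_lt_of_le hi (min_le_right _ _)
      rw [List.getElem_take] at hget
      have := hlt i hil hik
      simp only [← hget] at this ⊢
      simpa using this
    rw [List.countP_eq_length.mpr hall, List.length_take]
    omega
  have h2 : (s.drop k).countP (fun a => decide (a ≤ x)) = 0 := by
    apply List.countP_eq_zero.mpr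
    intro a ha
    obtain ⟨i, hi, hget⟩ := List.getElem_of_mem ha
    rw [List.length_drop] at hi
    have hil : k + i < s.length := by omega
    rw [List.getElem_drop] at hget
    have := hge (k + i) hil (Nat.le_add_right k i)
    simp only [← hget] at this ⊢
    simp; omega
  omega

lemma pv_count_reg (s : List Int) :
    s.countP (fun a => decide (a ≤ 49151)) =
      s.countP (fun x => decide (x ≤ 1023)) +
      s.countP (fun x => !decide (x ≤ 1023) && decide (x ≤ 49151)) := by
  induction s with
  | nil => simp
  | cons x t ih =>
    simp only [List.countP_cons, ih]
    by_cases h1 : x ≤ 1023 <;> by_cases h2 : x ≤ 49151 <;> simp [h1, h2] <;> omega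

lemma pv_count_dyn (s : List Int) :
    s.length = s.countP (fun a => decide (a ≤ 49151)) +
      s.countP (fun x => !decide (x ≤ 1023) && !decide (x ≤ 49151)) := by
  induction s with
  | nil => simp
  | cons x t ih =>
    simp only [List.countP_cons, List.length_cons, ih]
    by_cases h1 : x ≤ 1023 <;> by_cases h2 : x ≤ 49151 <;> simp [h1, h2] <;> omega

-- index-loop pair count = zip pair count (Nat level)
lemma pv_countAdj_range (s : List Int) :
    (List.range (s.length - 1)).countP (fun k => decide (s.getD (k+1) 0 - s.getD k 0 = 1)) =
      (s.zip s.tail).countP (fun p => p.2 - p.1 == 1) := by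
  induction s with
  | nil => simp
  | cons x t ih =>
    cases t with
    | nil => simp
    | cons y t' =>
      have hlen : (x :: y :: t').length - 1 = (y :: t').length - 1 + 1 := by simp
      rw [hlen, List.range_succ_eq_map]
      simp only [List.countP_cons, List.countP_map]
      have hcongr : (List.range ((y :: t').length - 1)).countP
            ((fun k => decide ((x :: y :: t').getD (k+1) 0 - (x :: y :: t').getD k 0 = 1)) ∘ Nat.succ)
          = (List.range ((y :: t').length - 1)).countP
            (fun k => decide ((y :: t').getD (k+1) 0 - (y :: t').getD k 0 = 1)) := by
        apply List.countP_congr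
        intro k _
        simp [Function.comp]
      rw [hcongr, ih]
      simp only [List.zip_cons_cons, List.tail_cons, List.countP_cons]
      by_cases h : y - x = 1
      · simp [h]
      · simp [h]

-- A's consecutive loop equals B's zip count (Int level)
lemma pv_seq_eq (s : List Int) :
    (PySem.List.pyRange 0 (PySem.List.len s - 1)).foldl
      (fun c i => if PySem.List.pyGetD s (i + 1) 0 - PySem.List.pyGetD s i 0 = 1
                  then c + 1 else c) 0 =
    ((s.zip s.tail).countP (fun p => p.2 - p.1 == 1) : Int) := by
  rw [PySem.List.pyRange_one, List.foldl_map]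
  have hcg := PySem.List.foldl_congr_mem (List.range (PySem.List.len s - 1 - 0).toNat)
      (fun (c : Int) (k : Nat) => if PySem.List.pyGetD s ((0:Int) + ↑k + 1) 0 - PySem.List.pyGetD s ((0:Int) + ↑k) 0 = 1 then c + 1 else c)
      (fun (c : Int) (k : Nat) => if (fun k => decide (s.getD (k+1) 0 - s.getD k 0 = 1)) k then c + 1 else c)
      0 ?_
  · rw [hcg, PySem.List.foldl_count_if]
    have hn : (PySem.List.len s - 1 - 0).toNat = s.length - 1 := by
      simp [PySem.List.len]
    rw [hn, pv_countAdj_range]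
    omega
  · intro acc k _
    beta_reduce
    rw [show ((0:Int) + (k:Int) + 1) = ((k+1 : Nat) : Int) by push_cast; ring,
        show ((0:Int) + (k:Int)) = ((k : Nat) : Int) by ring,
        PySem.List.pyGetD_natCast, PySem.List.pyGetD_natCast]
    simp

-- ===== VERDICT (by name: the statement is the Claim_ definition above) =====
theorem analyze_port_ranges_py_spec : Claim_equal_analyze_port_ranges_py := by
  intro ports _
  unfold Spec_analyze_port_ranges_py analyze_port_ranges_py analyze_port_ranges_py_alt
  simp only []
  set s := PySem.List.sorted ports (fun x => x) false with hs
  have hsorted : s.Pairwise (· ≤ ·) := by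
    simpa using PySem.List.sorted_pairwise ports (fun x => x)
  have hofList : PySem.Dict.ofList [("well_known", (0:Int)), ("registered", 0), ("dynamic", 0), ("sequential", 0)]
      = PySem.Dict.mk [("well_known", 0), ("registered", 0), ("dynamic", 0), ("sequential", 0)] := by decide
  rw [hofList, pv_foldA, pv_seq_eq]
  have hw := pv_bisect_countP s 1023 hsorted
  have hr := pv_bisect_countP s 49151 hsorted
  have hreg := pv_count_reg s
  have hdyn := pv_count_dyn s
  simp [PySem.Dict.insert, PySem.List.len, hw, hr]
  omega
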